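-- pv_equiv track=rewrite | github.com/calderbuild/BenchScope | src/prefilter/rule_filter.py | _has_tool_suffix
-- ===== SOURCE A (Python) =====
-- def _has_tool_suffix(title: str) -> bool:
--     """检查标题是否以工具类后缀结尾（如 xxx-lib, xxx-client, xxx-tokenizer）"""
--     tool_suffixes = [
--         "-lib",
--         "-library",
--         "-client",
--         "-sdk",
--         "-wrapper",
--         "-tool",
--         "-utils",
--         "-helper",
--         "-connector",
--         "-adapter",
--         "-parser",
--         "-tokenizer",
--         "-splitter",
--         "-package",
--     ]
--     title_lower = title.lower().replace(" ", "-").replace("_", "-")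
--     return any(title_lower.endswith(suffix) for suffix in tool_suffixes)
-- ===== SOURCE B (Python) =====
-- _TOOL_WORDS = {
--     "lib", "library", "client", "sdk", "wrapper", "tool", "utils",
--     "helper", "connector", "adapter", "parser", "tokenizer",
--     "splitter", "package",
-- }
--
--
-- def _has_tool_suffix(title: str) -> bool:
--     t = title.lower().replace(" ", "-").replace("_", "-")
--     if "-" not in t:
--         return False
--     return t.rsplit("-", 1)[1] in _TOOL_WORDS
-- ===== Notes on version B (the rewrite author's own statement) =====
-- stated objective: idiomatic
-- what changed: Instead of A's linear scan testing endswith against all 14 hyphenated suffixes, B splits the normalized title once at its last hyphen (after a '-'-presence guard) and looks the final token up in a set of bare suffix words.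
import Mathlib
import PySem

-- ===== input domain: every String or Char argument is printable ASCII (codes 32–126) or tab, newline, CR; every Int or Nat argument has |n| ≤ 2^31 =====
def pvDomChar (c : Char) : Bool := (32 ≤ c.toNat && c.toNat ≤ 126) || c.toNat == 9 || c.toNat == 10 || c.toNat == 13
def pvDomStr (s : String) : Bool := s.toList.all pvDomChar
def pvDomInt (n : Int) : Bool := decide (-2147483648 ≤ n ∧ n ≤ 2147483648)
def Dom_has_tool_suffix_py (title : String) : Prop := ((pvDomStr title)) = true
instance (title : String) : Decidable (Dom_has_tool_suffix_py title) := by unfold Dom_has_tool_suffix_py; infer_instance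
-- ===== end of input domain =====

-- B replaces A's 14-way endswith scan by one split at the last '-' and a lookup of the
-- final token in a set of bare suffix words (objective: idiomatic; same behaviour).

-- ===== PORT A =====
def has_tool_suffix_py (title : String) : Bool :=
  let tool_suffixes : List String :=
    ["-lib", "-library", "-client", "-sdk", "-wrapper", "-tool", "-utils",
     "-helper", "-connector", "-adapter", "-parser", "-tokenizer", "-splitter", "-package"]
  let title_lower :=
    PySem.Str.replace (PySem.Str.replace (PySem.Str.lower title) " " "-") "_" "-"
  tool_suffixes.any (fun suffix => PySem.Str.endswith title_lower suffix)

-- ===== PORT B =====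
-- module-level set _TOOL_WORDS of Source B (a set of string literals, kept as the distinct list)
def pvToolWords : List (List Char) :=
  ["lib".toList, "library".toList, "client".toList, "sdk".toList, "wrapper".toList,
   "tool".toList, "utils".toList, "helper".toList, "connector".toList, "adapter".toList,
   "parser".toList, "tokenizer".toList, "splitter".toList, "package".toList]

def has_tool_suffix_py_alt (title : String) : Bool :=
  let t := PySem.Str.replace (PySem.Str.replace (PySem.Str.lower title) " " "-") "_" "-"
  if PySem.Str.isIn "-" t then
    -- t.rsplit("-", 1)[1]: with "-" present, the last piece is exactly the chars after
    -- the LAST '-' — ported by hand as reverse/takeWhile/reverse (exact here)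
    let last := (t.toList.reverse.takeWhile (fun c => c ≠ '-')).reverse
    pvToolWords.contains last
  else
    false

-- ===== PRECONDITION & SPEC =====
def Spec_has_tool_suffix_py (title : String) (out : Bool) : Prop := out = has_tool_suffix_py_alt title
instance (title : String) (out : Bool) : Decidable (Spec_has_tool_suffix_py title out) := by unfold Spec_has_tool_suffix_py; infer_instance

-- ===== CLAIM (what is proved, stated in full; the proofs are below) =====
def Claim_equal_has_tool_suffix_py : Prop := ∀ (title : String), Dom_has_tool_suffix_py title → Spec_has_tool_suffix_py title (has_tool_suffix_py title)

-- ===== LEMMAS AND PROOFS =====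

-- (v ++ ['-']) is a prefix of r  ↔  r reaches a '-' and the part before its first '-' is v
theorem pv_prefix_dash_iff (v : List Char) (hv : '-' ∉ v) :
    ∀ (r : List Char),
      ((v ++ ['-']) <+: r ↔ (r.takeWhile (fun c => c ≠ '-') = v ∧ '-' ∈ r)) := by
  induction v with
  | nil =>
    intro r
    cases r with
    | nil => simp
    | cons c r' =>
      by_cases hc : c = '-'
      · subst hc; simp
      · simp [hc, List.cons_prefix_cons, Ne.symm hc]
  | cons a v' ih =>
    intro r
    have ha : a ≠ '-' := by intro h; exact hv (h ▸ List.mem_cons_self)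
    have hv' : '-' ∉ v' := fun h => hv (List.mem_cons_of_mem _ h)
    cases r with
    | nil => simp
    | cons c r' =>
      by_cases hc : c = '-'
      · subst hc
        constructor
        · rintro h
          rw [List.cons_append, List.cons_prefix_cons] at h
          exact absurd h.1 ha
        · rintro ⟨h, -⟩
          simp at h
      · rw [List.cons_append, List.cons_prefix_cons]
        rw [List.takeWhile_cons_of_pos (by simpa using hc)]
        constructor
        · rintro ⟨rfl, h⟩
          have := (ih hv' r').mp h
          exact ⟨by rw [this.1], List.mem_cons_of_mem _ this.2⟩
        · rintro ⟨h, hm⟩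
          obtain ⟨rfl, h2⟩ := List.cons.inj h
          have hm' : '-' ∈ r' := by
            rcases List.mem_cons.mp hm with h | h
            · exact absurd h.symm ha
            · exact h
          exact ⟨rfl, (ih hv' r').mpr ⟨h2, hm'⟩⟩

-- endswith '-'::w  ↔  the token after the last '-' is w  (for a word w with no '-')
theorem pv_endswith_dash_word (cs w : List Char) (hw : '-' ∉ w) :
    PySem.Chars.endswith cs ('-' :: w) =
      (decide ('-' ∈ cs) && ((cs.reverse.takeWhile (fun c => c ≠ '-')).reverse == w)) := by
  rw [Bool.eq_iff_iff, PySem.Chars.endswith_iff]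
  rw [← List.reverse_prefix]
  have : ('-' :: w).reverse = w.reverse ++ ['-'] := by simp
  rw [this, pv_prefix_dash_iff w.reverse (by simpa using hw) cs.reverse]
  simp only [Bool.and_eq_true, decide_eq_true_eq, beq_iff_eq, List.mem_reverse,
    List.reverse_eq_iff]
  exact and_comm

theorem has_tool_suffix_py_spec_aux (t : String) :
    (["-lib", "-library", "-client", "-sdk", "-wrapper", "-tool", "-utils",
      "-helper", "-connector", "-adapter", "-parser", "-tokenizer", "-splitter",
      "-package"].any (fun suffix => PySem.Str.endswith t suffix)) =
    (if PySem.Str.isIn "-" t then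
       pvToolWords.contains ((t.toList.reverse.takeWhile (fun c => c ≠ '-')).reverse)
     else false) := by
  have hin : PySem.Str.isIn "-" t = decide ('-' ∈ t.toList) := by
    rw [Bool.eq_iff_iff, PySem.Str.isIn_eq, PySem.Chars.isIn_iff_infix]
    show ['-'] <:+: t.toList ↔ _
    rw [List.singleton_infix_iff]; simp
  have hsuf : ∀ (w : List Char), '-' ∉ w →
      PySem.Str.endswith t (String.ofList ('-' :: w)) =
        (decide ('-' ∈ t.toList) && ((t.toList.reverse.takeWhile (fun c => c ≠ '-')).reverse == w)) := by
    intro w hw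
    rw [PySem.Str.endswith_eq]
    rw [String.toList_ofList, pv_endswith_dash_word t.toList w hw]
  have e1 := hsuf "lib".toList (by decide)
  have e2 := hsuf "library".toList (by decide)
  have e3 := hsuf "client".toList (by decide)
  have e4 := hsuf "sdk".toList (by decide)
  have e5 := hsuf "wrapper".toList (by decide)
  have e6 := hsuf "tool".toList (by decide)
  have e7 := hsuf "utils".toList (by decide)
  have e8 := hsuf "helper".toList (by decide)
  have e9 := hsuf "connector".toList (by decide)
  have e10 := hsuf "adapter".toList (by decide)
  have e11 := hsuf "parser".toList (by decide)
  have e12 := hsuf "tokenizer".toList (by decide)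
  have e13 := hsuf "splitter".toList (by decide)
  have e14 := hsuf "package".toList (by decide)
  simp only [List.any_cons, List.any_nil, Bool.or_false] at *
  rw [show ("-lib" : String) = String.ofList ('-' :: "lib".toList) from rfl,
      show ("-library" : String) = String.ofList ('-' :: "library".toList) from rfl,
      show ("-client" : String) = String.ofList ('-' :: "client".toList) from rfl,
      show ("-sdk" : String) = String.ofList ('-' :: "sdk".toList) from rfl,
      show ("-wrapper" : String) = String.ofList ('-' :: "wrapper".toList) from rfl,
      show ("-tool" : String) = String.ofList ('-' :: "tool".toList) from rfl,
      show ("-utils" : String) = String.ofList ('-' :: "utils".toList) from rfl,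
      show ("-helper" : String) = String.ofList ('-' :: "helper".toList) from rfl,
      show ("-connector" : String) = String.ofList ('-' :: "connector".toList) from rfl,
      show ("-adapter" : String) = String.ofList ('-' :: "adapter".toList) from rfl,
      show ("-parser" : String) = String.ofList ('-' :: "parser".toList) from rfl,
      show ("-tokenizer" : String) = String.ofList ('-' :: "tokenizer".toList) from rfl,
      show ("-splitter" : String) = String.ofList ('-' :: "splitter".toList) from rfl,
      show ("-package" : String) = String.ofList ('-' :: "package".toList) from rfl,
      e1, e2, e3, e4, e5, e6, e7, e8, e9, e10, e11, e12, e13, e14, hin]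
  by_cases hm : '-' ∈ t.toList
  · simp only [hm, pvToolWords, decide_true, Bool.true_and]
    rw [Bool.eq_iff_iff]
    simp [List.reverse_eq_iff]
  · simp [hm]

-- ===== VERDICT (by name: the statement is the Claim_ definition above) =====
theorem has_tool_suffix_py_spec : Claim_equal_has_tool_suffix_py := by
  intro title _
  unfold Spec_has_tool_suffix_py has_tool_suffix_py has_tool_suffix_py_alt
  exact has_tool_suffix_py_spec_aux _
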